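-- pv_equiv track=rewrite | github.com/afomya/CSS-112-PA-4 | aalemay_243_PA4.py | any_adjacent_vertebrates
-- ===== SOURCE A (Python) =====
-- def any_adjacent_vertebrates(animals, vertebrates):
--     # We start off with a false premise
--     vertebrate_maybe = False
--     for i in range(len(animals)-1):
--         for j in range(len(vertebrates)):
-- # If animal is vertebrate, then we set vertebrate_maybe as True
--             statement1 = animals[i]
--             statement2 = vertebrates[j]
--             if statement1 == statement2:
--                 vertebrate_maybe = True
--                 break
--         if (vertebrate_maybe == True):
--             vertebrate_maybe = False
--             for j in range(len(vertebrates)):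
-- # If the animlas are nnext to eat other.
--                 if (animals[i + 1] == vertebrates[j]):
--                     return True
--     return False
-- ===== SOURCE B (Python) =====
-- def any_adjacent_vertebrates(animals, vertebrates):
--     if not animals:
--         return False
--     prev = animals[0] in vertebrates
--     for a in animals[1:]:
--         cur = a in vertebrates
--         if prev and cur:
--             return True
--         prev = cur
--     return False
-- ===== Notes on version B (the rewrite author's own statement) =====
-- stated objective: simpler
-- what changed: B replaces A's nested loops (which rescan the vertebrates list for both animals[i] and animals[i+1] at every index, via a reset flag) with a single left-to-right pass that tests each animal's membership once and carries the previous animal's flag.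
import Mathlib
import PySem

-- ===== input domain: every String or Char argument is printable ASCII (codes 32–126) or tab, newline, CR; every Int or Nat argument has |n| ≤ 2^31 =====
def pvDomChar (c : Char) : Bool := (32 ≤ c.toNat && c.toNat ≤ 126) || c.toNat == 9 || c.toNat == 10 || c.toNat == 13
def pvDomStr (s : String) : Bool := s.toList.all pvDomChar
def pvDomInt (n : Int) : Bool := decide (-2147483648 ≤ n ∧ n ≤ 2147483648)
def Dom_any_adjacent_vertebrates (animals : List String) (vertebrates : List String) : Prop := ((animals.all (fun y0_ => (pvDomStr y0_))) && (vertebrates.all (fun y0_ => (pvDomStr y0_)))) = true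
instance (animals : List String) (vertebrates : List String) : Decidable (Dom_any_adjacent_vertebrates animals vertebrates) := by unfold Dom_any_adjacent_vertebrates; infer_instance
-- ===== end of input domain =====

-- B replaces A's nested, flag-resetting membership rescans by a single pass that tests each
-- animal's membership once and carries the previous flag (objective: simpler).

-- ===== PORT A =====
-- inner 'for j in range(len(vertebrates)): if x == vertebrates[j]: … break' membership scan
def memScan (x : String) : List String → Bool
  | [] => false
  | v :: rest => if x == v then true else memScan x rest

-- the outer 'for i in range(len(animals)-1)' loop with its flag-and-second-scan body
def aLoop (animals vertebrates : List String) : List Nat → Bool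
  | [] => false
  | i :: rest =>
    if memScan (animals.getD i "") vertebrates then
      -- vertebrate_maybe was set (and is reset); run the second scan, return True on a hit
      if memScan (animals.getD (i + 1) "") vertebrates then true
      else aLoop animals vertebrates rest
    else aLoop animals vertebrates rest

def any_adjacent_vertebrates (animals : List String) (vertebrates : List String) : Bool :=
  aLoop animals vertebrates (List.range (animals.length - 1))

-- ===== PORT B =====
-- 'for a in animals[1:]: cur = a in vertebrates; if prev and cur: return True; prev = cur'
def bGo (vertebrates : List String) (prev : Bool) : List String → Bool
  | [] => false
  | a :: rest =>
    let cur := vertebrates.contains a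
    if prev && cur then true else bGo vertebrates cur rest

def any_adjacent_vertebrates_alt (animals : List String) (vertebrates : List String) : Bool :=
  match animals with
  | [] => false
  | a :: rest => bGo vertebrates (vertebrates.contains a) rest

-- ===== PRECONDITION & SPEC =====
def Spec_any_adjacent_vertebrates (animals : List String) (vertebrates : List String) (out : Bool) : Prop := out = any_adjacent_vertebrates_alt animals vertebrates
instance (animals : List String) (vertebrates : List String) (out : Bool) : Decidable (Spec_any_adjacent_vertebrates animals vertebrates out) := by unfold Spec_any_adjacent_vertebrates; infer_instance

-- ===== CLAIM (what is proved, stated in full; the proofs are below) =====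
def Claim_equal_any_adjacent_vertebrates : Prop := ∀ (animals : List String) (vertebrates : List String), Dom_any_adjacent_vertebrates animals vertebrates → Spec_any_adjacent_vertebrates animals vertebrates (any_adjacent_vertebrates animals vertebrates)

-- ===== LEMMAS AND PROOFS =====

-- proof-side view of both programs: adjacent-pair scan over the flag table
def adjScan : List Bool → Bool
  | a :: b :: rest => (a && b) || adjScan (b :: rest)
  | _ => false

lemma bGo_eq_adjScan (vertebrates : List String) (prev : Bool) (l : List String) :
    bGo vertebrates prev l = adjScan (prev :: l.map (fun a => vertebrates.contains a)) := by
  induction l generalizing prev with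
  | nil => rfl
  | cons a rest ih =>
    simp only [bGo, List.map_cons, adjScan, ih]
    cases prev <;> cases vertebrates.contains a <;> simp

lemma alt_eq_adjScan (animals vertebrates : List String) :
    any_adjacent_vertebrates_alt animals vertebrates =
      adjScan (animals.map (fun a => vertebrates.contains a)) := by
  cases animals with
  | nil => rfl
  | cons a rest => simp [any_adjacent_vertebrates_alt, bGo_eq_adjScan, adjScan]

lemma memScan_eq_contains (x : String) (l : List String) : memScan x l = l.contains x := by
  induction l with
  | nil => rfl
  | cons v rest ih => by_cases h : x = v <;> simp [memScan, ih, h]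

lemma aLoop_eq_any (animals vertebrates : List String) (idxs : List Nat) :
    aLoop animals vertebrates idxs =
      idxs.any (fun i => memScan (animals.getD i "") vertebrates &&
                         memScan (animals.getD (i + 1) "") vertebrates) := by
  induction idxs with
  | nil => rfl
  | cons i rest ih =>
    unfold aLoop
    rw [List.any_cons, ← ih]
    cases memScan (animals.getD i "") vertebrates <;>
      cases memScan (animals.getD (i + 1) "") vertebrates <;> simp

lemma adjScan_eq_any (bs : List Bool) :
    adjScan bs = (List.range (bs.length - 1)).any
      (fun i => bs.getD i false && bs.getD (i + 1) false) := by
  match bs with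
  | [] => rfl
  | [a] => rfl
  | a :: b :: rest =>
    have ih := adjScan_eq_any (b :: rest)
    simp only [adjScan, ih, List.length_cons, Nat.add_sub_cancel, List.range_succ_eq_map,
      List.any_cons, List.any_map]
    simp [Function.comp_def, List.getD]

lemma any_congr_list {α : Type} (l : List α) (p q : α → Bool)
    (h : ∀ a ∈ l, p a = q a) : l.any p = l.any q := by
  induction l with
  | nil => rfl
  | cons a rest ih =>
    simp only [List.any_cons, h a (List.mem_cons_self ..),
      ih (fun x hx => h x (List.mem_cons_of_mem _ hx))]

-- ===== VERDICT (by name: the statement is the Claim_ definition above) =====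
theorem any_adjacent_vertebrates_spec : Claim_equal_any_adjacent_vertebrates := by
  intro animals vertebrates _
  unfold Spec_any_adjacent_vertebrates any_adjacent_vertebrates
  rw [alt_eq_adjScan, aLoop_eq_any, adjScan_eq_any]
  simp only [List.length_map]
  apply any_congr_list
  intro i hi
  have hi' : i < animals.length - 1 := List.mem_range.mp hi
  have h1 : i < animals.length := by omega
  have h2 : i + 1 < animals.length := by omega
  rw [List.getD_eq_getElem _ _ h1, List.getD_eq_getElem _ _ h2,
      List.getD_eq_getElem _ _ (by simpa using h1), List.getD_eq_getElem _ _ (by simpa using h2)]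
  simp [memScan_eq_contains]
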